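-- pv_equiv track=rewrite | github.com/githubAloksingh/GFG-160-Days-Challenge | CamelCase Pattern Matching.py | camelCase
-- ===== SOURCE A (Python) =====
-- def camelCase(arr,pat):
--     #code here
--     result=[]
--     for word in arr:
--         upper_case=""
--         for ch in word:
--             if ch.isupper():
--                 upper_case+=ch
--         if upper_case.startswith(pat):
--             result.append(word)
--     return sorted(result)
-- ===== SOURCE B (Python) =====
-- def camelCase(arr, pat):
--     # Two-pointer incremental match: never materializes the uppercase subsequence.
--     result = []
--     n = len(pat)
--     for word in arr:
--         j = 0
--         for ch in word:
--             if ch.isupper():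
--                 if j < n and ch == pat[j]:
--                     j += 1
--                     if j == n:
--                         break
--                 else:
--                     break
--         if j == n:
--             result.append(word)
--     return sorted(result)
-- ===== Notes on version B (the rewrite author's own statement) =====
-- stated objective: alternative
-- what changed: Instead of building each word's uppercase subsequence as a string and calling startswith, B runs a two-pointer incremental match of pat against the uppercase characters, breaking early on mismatch or once pat is fully matched, and never materializes the subsequence.
import Mathlib
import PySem

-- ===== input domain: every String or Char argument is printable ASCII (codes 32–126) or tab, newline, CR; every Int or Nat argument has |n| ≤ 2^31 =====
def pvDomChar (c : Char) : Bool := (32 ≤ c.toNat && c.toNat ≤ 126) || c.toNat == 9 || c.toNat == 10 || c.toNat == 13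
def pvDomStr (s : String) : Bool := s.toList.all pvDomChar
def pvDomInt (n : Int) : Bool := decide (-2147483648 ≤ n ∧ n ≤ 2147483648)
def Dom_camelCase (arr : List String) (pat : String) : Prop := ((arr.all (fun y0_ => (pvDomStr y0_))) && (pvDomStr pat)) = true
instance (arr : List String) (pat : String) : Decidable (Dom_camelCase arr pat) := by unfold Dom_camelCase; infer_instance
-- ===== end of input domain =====

-- B replaces "build uppercase subsequence then startswith" with a two-pointer incremental match (same cost, different decomposition).


-- ===== PORT A =====
-- upper_case is accumulated as a List Char (Python str concatenation, code-point exact)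
def camelCase (arr : List String) (pat : String) : List String :=
  let result := arr.foldl (fun result word =>
    let upper_case := word.toList.foldl
      (fun acc ch => if PySem.Chars.isupper ch then acc ++ [ch] else acc) []
    if PySem.Chars.startswith upper_case pat.toList then result ++ [word] else result) []
  PySem.List.sorted result (fun x => x) false

-- ===== PORT B =====
-- the index j into pat is ported as the remaining suffix of pat (j = n ↔ suffix = []);
-- break-on-mismatch / break-on-full-match are the corresponding early returns
def camelCaseMatch : List Char → List Char → Bool
  | _, [] => true
  | [], _ :: _ => false
  | ch :: cs, p :: ps =>
    if PySem.Chars.isupper ch then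
      if ch == p then camelCaseMatch cs ps else false
    else camelCaseMatch cs (p :: ps)

def camelCase_alt (arr : List String) (pat : String) : List String :=
  PySem.List.sorted (arr.filter (fun word => camelCaseMatch word.toList pat.toList))
    (fun x => x) false

-- ===== PRECONDITION & SPEC =====
def Spec_camelCase (arr : List String) (pat : String) (out : List String) : Prop := out = camelCase_alt arr pat
instance (arr : List String) (pat : String) (out : List String) : Decidable (Spec_camelCase arr pat out) := by unfold Spec_camelCase; infer_instance

-- ===== CLAIM (what is proved, stated in full; the proofs are below) =====
def Claim_equal_camelCase : Prop := ∀ (arr : List String) (pat : String), Dom_camelCase arr pat → Spec_camelCase arr pat (camelCase arr pat)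

-- ===== LEMMAS AND PROOFS =====

-- the two-pointer match succeeds iff pat is a prefix of the uppercase subsequence
theorem camelCaseMatch_eq_startswith (cs ps : List Char) :
    camelCaseMatch cs ps = PySem.Chars.startswith (cs.filter PySem.Chars.isupper) ps := by
  induction cs generalizing ps with
  | nil =>
    cases ps with
    | nil => rfl
    | cons p ps =>
      cases hsw : PySem.Chars.startswith (List.filter PySem.Chars.isupper []) (p :: ps) with
      | false => rfl
      | true =>
        have h := (PySem.Chars.startswith_iff _ _).mp hsw
        simp at h
  | cons c cs ih =>
    cases ps with
    | nil =>
      have h : PySem.Chars.startswith ((c :: cs).filter PySem.Chars.isupper) [] = true :=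
        (PySem.Chars.startswith_iff _ _).mpr List.nil_prefix
      rw [h]
      rfl
    | cons p ps =>
      simp only [camelCaseMatch, List.filter_cons]
      by_cases hu : PySem.Chars.isupper c
      · rw [if_pos hu, if_pos hu]
        by_cases he : c = p
        · subst he
          rw [if_pos (by simp), ih ps, Bool.eq_iff_iff,
            PySem.Chars.startswith_iff, PySem.Chars.startswith_iff,
            List.cons_prefix_cons]
          simp
        · rw [if_neg (by simpa using he)]
          cases hsw : PySem.Chars.startswith (c :: cs.filter PySem.Chars.isupper) (p :: ps) with
          | false => rfl
          | true =>
            have h := (PySem.Chars.startswith_iff _ _).mp hsw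
            rw [List.cons_prefix_cons] at h
            exact absurd h.1.symm he
      · rw [if_neg hu, if_neg hu]
        exact ih (p :: ps)

-- ===== VERDICT (by name: the statement is the Claim_ definition above) =====
theorem camelCase_spec : Claim_equal_camelCase := by
  intro arr pat _
  unfold Spec_camelCase camelCase camelCase_alt
  simp only [PySem.List.foldl_append_ite_eq_filter, List.nil_append]
  congr 1
  refine List.filter_congr (fun w _ => ?_)
  simp [camelCaseMatch_eq_startswith]
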